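-- pv_equiv track=rewrite | github.com/Traube-Olga/Scheduler | scheduler.py | EDF
-- ===== SOURCE A (Python) =====
-- def EDF(jobs, servers, dependencies):
--     schedule = []
--     current_date = 0
--     server_id = 0
--     frequency = 1
--     unfinished_jobs = jobs.copy()
--
--     def get_earliest_deadline_job(unfinished_jobs):
--         earliest_deadline = float('inf')
--         earliest_deadline_job = None
--
--         for job_id, job in unfinished_jobs.items():
--             deadline = job[2]
--
--             if deadline < earliest_deadline:
--                 earliest_deadline = deadline
--                 earliest_deadline_job = job_id
--
--         return earliest_deadline_job
--
--     while unfinished_jobs: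
--         job_id = get_earliest_deadline_job(unfinished_jobs)
--         job = unfinished_jobs.pop(job_id)
--
--         arrival_date = job[0]
--         w = job[1]
--
--         start = max(current_date, arrival_date)
--         end = start + w
--
--         current_date = end
--
--         schedule.append([job_id[0], server_id, start, end, frequency])
--
--     return schedule
-- ===== SOURCE B (Python) =====
-- def EDF(jobs, servers, dependencies):
--     schedule = []
--     current_date = 0
--     for job_id, job in sorted(jobs.items(), key=lambda kv: kv[1][2]):
--         start = max(current_date, job[0])
--         end = start + job[1]
--         current_date = end
--         schedule.append([job_id[0], 0, start, end, 1])
--     return schedule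
-- ===== Notes on version B (the rewrite author's own statement) =====
-- stated objective: faster
-- what changed: Replaces the quadratic select-minimum-and-pop loop with one stable sort of the job items by deadline followed by a single linear scheduling pass.
import Mathlib
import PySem

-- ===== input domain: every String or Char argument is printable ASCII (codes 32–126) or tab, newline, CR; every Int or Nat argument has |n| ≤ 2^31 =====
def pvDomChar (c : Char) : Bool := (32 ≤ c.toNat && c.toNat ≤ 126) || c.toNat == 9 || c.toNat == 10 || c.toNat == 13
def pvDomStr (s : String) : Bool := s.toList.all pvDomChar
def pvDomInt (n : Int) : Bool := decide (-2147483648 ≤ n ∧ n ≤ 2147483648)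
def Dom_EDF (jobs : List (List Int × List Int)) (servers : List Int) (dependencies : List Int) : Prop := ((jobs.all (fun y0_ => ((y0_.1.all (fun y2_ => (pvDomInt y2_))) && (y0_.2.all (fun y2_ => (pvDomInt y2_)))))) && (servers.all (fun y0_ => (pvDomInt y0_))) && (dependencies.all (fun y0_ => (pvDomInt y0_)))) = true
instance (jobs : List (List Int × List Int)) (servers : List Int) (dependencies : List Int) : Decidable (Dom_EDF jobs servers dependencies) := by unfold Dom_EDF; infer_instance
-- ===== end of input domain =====

-- B replaces A's repeated O(n) earliest-deadline scan over the remaining dict by one stable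
-- sort of the job items by deadline followed by a single sequential pass (objective: faster).
-- (A pops from a COPY of `jobs`, so the caller's dict is not mutated; return values only.)


-- ===== PORT A =====
-- get_earliest_deadline_job: fold over the remaining items, tracking (earliest_deadline, job_id);
-- `None`/float('inf') start is modelled by the Option state (any Int deadline beats infinity).
def pvSel (st : Option (Int × List Int)) (kv : List Int × List Int) : Option (Int × List Int) :=
  match st with
  | none => some (PySem.List.pyGetD kv.2 2 0, kv.1)
  | some (e, j) =>
    if PySem.List.pyGetD kv.2 2 0 < e then some (PySem.List.pyGetD kv.2 2 0, kv.1)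
    else some (e, j)

def pvGetEarliest (unfinished : List (List Int × List Int)) : Option (List Int) :=
  (unfinished.foldl pvSel none).map (·.2)

-- the while-loop; fuel = number of remaining items (each iteration pops exactly one)
def pvLoopA : Nat → List (List Int × List Int) → Int → List (List Int) → List (List Int)
  | 0, _, _, schedule => schedule
  | _ + 1, [], _, schedule => schedule
  | fuel + 1, kv :: rest, current_date, schedule =>
    match pvGetEarliest (kv :: rest) with
    | none => schedule  -- unreachable: the dict is nonempty
    | some job_id =>
      -- unfinished_jobs.pop(job_id): look the value up by key and remove that entry
      let job := (((kv :: rest).find? (fun e => e.1 == job_id)).map (·.2)).getD []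
      let unfinished' := (kv :: rest).eraseP (fun e => e.1 == job_id)
      let start := max current_date (PySem.List.pyGetD job 0 0)
      let «end» := start + PySem.List.pyGetD job 1 0
      pvLoopA fuel unfinished' «end»
        (schedule ++ [[PySem.List.pyGetD job_id 0 0, 0, start, «end», 1]])

def EDF (jobs : List (List Int × List Int)) (servers : List Int) (dependencies : List Int) : List (List Int) :=
  pvLoopA jobs.length jobs 0 []

-- ===== PORT B =====
-- key=lambda kv: kv[1][2]
def pvKey (kv : List Int × List Int) : Int := PySem.List.pyGetD kv.2 2 0

-- one loop iteration of B: (schedule so far, current_date) → next state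
def pvStepB (st : List (List Int) × Int) (kv : List Int × List Int) : List (List Int) × Int :=
  let start := max st.2 (PySem.List.pyGetD kv.2 0 0)
  let «end» := start + PySem.List.pyGetD kv.2 1 0
  (st.1 ++ [[PySem.List.pyGetD kv.1 0 0, 0, start, «end», 1]], «end»)

def EDF_alt (jobs : List (List Int × List Int)) (servers : List Int) (dependencies : List Int) : List (List Int) :=
  ((PySem.List.sorted jobs pvKey false).foldl pvStepB ([], 0)).1

-- ===== PRECONDITION & SPEC =====
-- Pre_ excludes job entries whose key tuple is empty or whose value list has fewer than 3
-- elements — there Python A raises IndexError (job_id[0] / job[2]); the Nodup clause only pins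
-- the association list to the faithful rendering of a Python dict (whose keys are unique), it
-- excludes no representable input.
def Pre_EDF (jobs : List (List Int × List Int)) (servers : List Int) (dependencies : List Int) : Prop :=
  (jobs.map Prod.fst).Nodup ∧ ∀ kv ∈ jobs, kv.1 ≠ [] ∧ 3 ≤ kv.2.length
instance (jobs : List (List Int × List Int)) (servers : List Int) (dependencies : List Int) : Decidable (Pre_EDF jobs servers dependencies) := by unfold Pre_EDF; infer_instance

def pvWitness_EDF : (List (List Int × List Int)) × List Int × List Int :=
  ([([1], [0, 2, 5]), ([2], [1, 3, 4]), ([3], [0, 1, 4])], [0], [])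

def Spec_EDF (jobs : List (List Int × List Int)) (servers : List Int) (dependencies : List Int) (out : List (List Int)) : Prop := out = EDF_alt jobs servers dependencies
instance (jobs : List (List Int × List Int)) (servers : List Int) (dependencies : List Int) (out : List (List Int)) : Decidable (Spec_EDF jobs servers dependencies out) := by unfold Spec_EDF; infer_instance

-- ===== CLAIM (what is proved, stated in full; the proofs are below) =====
def Claim_equal_EDF : Prop := ∀ (jobs : List (List Int × List Int)) (servers : List Int) (dependencies : List Int), Dom_EDF jobs servers dependencies → Pre_EDF jobs servers dependencies → Spec_EDF jobs servers dependencies (EDF jobs servers dependencies)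

-- ===== LEMMAS AND PROOFS =====

-- abbreviation for the insertion step PySem.List.sorted is built from
def pvIns (x : List Int × List Int) (acc : List (List Int × List Int)) : List (List Int × List Int) :=
  PySem.List.insertBy (fun a b => decide (pvKey a < pvKey b)) x acc

lemma pvIns_cons_of_le (m x : List Int × List Int) (s : List (List Int × List Int))
    (h : pvKey m ≤ pvKey x) : pvIns x (m :: s) = m :: pvIns x s := by
  simp [pvIns, PySem.List.insertBy, not_lt.mpr h]

lemma pvFoldlIns_cons (m : List Int × List Int) (s : List (List Int × List Int))
    (q : List (List Int × List Int)) (h : ∀ y ∈ q, pvKey m ≤ pvKey y) :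
    q.foldl (fun acc x => pvIns x acc) (m :: s) = m :: q.foldl (fun acc x => pvIns x acc) s := by
  induction q generalizing s with
  | nil => rfl
  | cons x q ih =>
    simp only [List.foldl_cons]
    rw [pvIns_cons_of_le m x s (h x (by simp))]
    exact ih _ (fun y hy => h y (by simp [hy]))

lemma pvIns_front (m : List Int × List Int) (s : List (List Int × List Int))
    (h : ∀ y ∈ s, pvKey m < pvKey y) : pvIns m s = m :: s := by
  cases s with
  | nil => rfl
  | cons y t => simp [pvIns, PySem.List.insertBy, h y (by simp)]

-- the stable sort picks the FIRST minimal-key element first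
lemma pvSorted_split (p q : List (List Int × List Int)) (m : List Int × List Int)
    (hp : ∀ y ∈ p, pvKey m < pvKey y) (hq : ∀ y ∈ q, pvKey m ≤ pvKey y) :
    PySem.List.sorted (p ++ m :: q) pvKey false = m :: PySem.List.sorted (p ++ q) pvKey false := by
  rw [PySem.List.sorted_eq_foldl_insertBy, PySem.List.sorted_eq_foldl_insertBy]
  show (p ++ m :: q).foldl (fun acc x => pvIns x acc) [] = m :: (p ++ q).foldl (fun acc x => pvIns x acc) []
  rw [List.foldl_append, List.foldl_append, List.foldl_cons]
  have hmem : ∀ y ∈ p.foldl (fun acc x => pvIns x acc) [], pvKey m < pvKey y := by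
    intro y hy
    apply hp
    have := (PySem.List.sorted_perm p pvKey false).mem_iff (a := y)
    rw [PySem.List.sorted_eq_foldl_insertBy] at this
    exact this.mp hy
  rw [show pvIns m (p.foldl (fun acc x => pvIns x acc) []) = m :: p.foldl (fun acc x => pvIns x acc) [] from pvIns_front _ _ hmem]
  exact pvFoldlIns_cons _ _ _ hq

-- what A's inner fold computes: the first element attaining the minimal deadline
lemma pvSel_fold_split (l : List (List Int × List Int)) (hne : l ≠ []) :
    ∃ p m q, l = p ++ m :: q ∧ l.foldl pvSel none = some (pvKey m, m.1) ∧
      (∀ y ∈ p, pvKey m < pvKey y) ∧ (∀ y ∈ q, pvKey m ≤ pvKey y) := by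
  induction l using List.reverseRecOn with
  | nil => exact absurd rfl hne
  | append_singleton l x ih =>
    rcases eq_or_ne l [] with rfl | hl
    · exact ⟨[], x, [], by simp, rfl, by simp, by simp⟩
    · obtain ⟨p, m, q, hsplit, hfold, hp, hq⟩ := ih hl
      rw [List.foldl_append, hfold]
      by_cases h : PySem.List.pyGetD x.2 2 0 < PySem.List.pyGetD m.2 2 0
      · refine ⟨l, x, [], by simp, ?_, ?_, by simp⟩
        · simp [pvSel, pvKey, h]
        · intro y hy
          rw [hsplit] at hy
          rcases List.mem_append.mp hy with hy | hy
          · exact h.trans (hp y hy)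
          · rcases List.mem_cons.mp hy with rfl | hy
            · exact h
            · exact h.trans_le (hq y hy)
      · refine ⟨p, m, q ++ [x], by simp [hsplit], ?_, hp, ?_⟩
        · simp [pvSel, pvKey, h]
        · intro y hy
          rcases List.mem_append.mp hy with hy | hy
          · exact hq y hy
          · simp at hy; subst hy; exact not_lt.mp h

lemma pvGetEarliest_split (l : List (List Int × List Int)) (hne : l ≠ []) :
    ∃ p m q, l = p ++ m :: q ∧ pvGetEarliest l = some m.1 ∧
      (∀ y ∈ p, pvKey m < pvKey y) ∧ (∀ y ∈ q, pvKey m ≤ pvKey y) := by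
  obtain ⟨p, m, q, hsplit, hfold, hp, hq⟩ := pvSel_fold_split l hne
  exact ⟨p, m, q, hsplit, by simp [pvGetEarliest, hfold], hp, hq⟩

lemma pvFind_pop (p q : List (List Int × List Int)) (m : List Int × List Int)
    (hkeys : ∀ y ∈ p, y.1 ≠ m.1) :
    (p ++ m :: q).find? (fun e => e.1 == m.1) = some m ∧
    (p ++ m :: q).eraseP (fun e => e.1 == m.1) = p ++ q := by
  induction p with
  | nil => simp
  | cons y p ih =>
    have hy : (y.1 == m.1) = false := by simp [hkeys y (by simp)]
    have := ih (fun z hz => hkeys z (by simp [hz]))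
    simp [hy, this.1, this.2]

lemma pvLoopA_eq (n : Nat) : ∀ (l : List (List Int × List Int)) (cur : Int) (sched : List (List Int)),
    l.length ≤ n → (l.map Prod.fst).Nodup →
    pvLoopA n l cur sched = (((PySem.List.sorted l pvKey false).foldl pvStepB (sched, cur)).1) := by
  induction n with
  | zero =>
    intro l cur sched hlen _
    rw [List.length_eq_zero_iff.mp (Nat.le_zero.mp hlen)]
    rfl
  | succ n ih =>
    intro l cur sched hlen hnd
    cases l with
    | nil => rfl
    | cons kv rest =>
      obtain ⟨p, m, q, hsplit, hge, hp, hq⟩ := pvGetEarliest_split (kv :: rest) (by simp)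
      have hkeys : ∀ y ∈ p, y.1 ≠ m.1 := by
        intro y hy heq
        rw [hsplit, List.map_append, List.map_cons] at hnd
        have h1 : y.1 ∈ List.map Prod.fst p := List.mem_map.mpr ⟨y, hy, rfl⟩
        have h2 : y.1 ∈ m.1 :: List.map Prod.fst q := by simp [heq]
        exact (List.nodup_append.mp hnd).2.2 y.1 h1 y.1 h2 rfl
      obtain ⟨hfind, herase⟩ := pvFind_pop p q m hkeys
      have hnd' : ((p ++ q).map Prod.fst).Nodup := by
        rw [hsplit, List.map_append, List.map_cons] at hnd
        rw [List.map_append]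
        exact List.Nodup.sublist (List.Sublist.append_left (List.sublist_cons_self _ _) _) hnd
      have hlen' : (p ++ q).length ≤ n := by
        have := congrArg List.length hsplit
        simp at this hlen ⊢
        omega
      rw [pvLoopA, hge]
      simp only [hsplit, hfind, herase, Option.map_some, Option.getD_some]
      rw [ih (p ++ q) _ _ hlen' hnd', pvSorted_split p q m hp hq, List.foldl_cons]
      rfl

-- ===== VERDICT (by name: the statement is the Claim_ definition above) =====
theorem EDF_spec : Claim_equal_EDF := by
  intro jobs servers dependencies _ hpre
  show EDF jobs servers dependencies = EDF_alt jobs servers dependencies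
  exact pvLoopA_eq jobs.length jobs 0 [] le_rfl hpre.1
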